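-- pv_equiv track=rewrite | github.com/Tempura-Roll/ProyectoICC1 | Code to expose/_Pokemon-Pregunta2.py | extraer_tipos_de_moves
-- ===== SOURCE A (Python) =====
-- tipos_pokemon = [
--     "Normal", "Fire", "Water", "Electric", "Grass", "Ice", "Fighting", "Poison",
--     "Ground", "Flying", "Psychic", "Bug", "Rock", "Ghost", "Dragon", "Dark",
--     "Steel", "Fairy"
-- ]
--
-- def extraer_tipos_de_moves(moves):
--     moves = moves if isinstance(moves, str) else ""
--     resultado = []
--     for tipo in tipos_pokemon:
--         if tipo in moves:
--             repeticiones = moves.count(tipo)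
--             resultado.extend([tipo] * repeticiones)
--     return " ".join(resultado)
-- ===== SOURCE B (Python) =====
-- tipos_pokemon = [
--     "Normal", "Fire", "Water", "Electric", "Grass", "Ice", "Fighting", "Poison",
--     "Ground", "Flying", "Psychic", "Bug", "Rock", "Ghost", "Dragon", "Dark",
--     "Steel", "Fairy"
-- ]
--
-- def extraer_tipos_de_moves(moves):
--     moves = moves if isinstance(moves, str) else ""
--     # one left-to-right scan: record, at each position, the (unique) type starting there
--     found = []
--     for i in range(len(moves)):
--         for tipo in tipos_pokemon:
--             if moves.startswith(tipo, i):
--                 found.append(tipo)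
--                 break
--     resultado = [t for t in tipos_pokemon for _ in range(found.count(t))]
--     return " ".join(resultado)
-- ===== Notes on version B (the rewrite author's own statement) =====
-- stated objective: alternative
-- what changed: A makes 18 independent substring-count passes (one moves.count per type) and extends the result per type; B makes a single left-to-right scan over moves recording the unique type name starting at each position, then emits each type in canonical order as many times as it was seen.
import Mathlib
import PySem

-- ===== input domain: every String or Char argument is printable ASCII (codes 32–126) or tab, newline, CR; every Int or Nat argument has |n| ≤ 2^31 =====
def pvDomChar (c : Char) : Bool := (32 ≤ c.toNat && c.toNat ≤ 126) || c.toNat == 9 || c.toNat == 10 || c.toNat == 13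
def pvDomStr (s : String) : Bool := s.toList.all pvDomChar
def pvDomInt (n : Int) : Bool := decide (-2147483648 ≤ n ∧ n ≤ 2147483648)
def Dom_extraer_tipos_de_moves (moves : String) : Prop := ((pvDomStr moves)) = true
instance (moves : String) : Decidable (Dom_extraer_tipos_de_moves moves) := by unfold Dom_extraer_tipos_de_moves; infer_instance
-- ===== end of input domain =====

-- B replaces A's 18 independent substring-count passes over moves by one left-to-right scan
-- recording the (unique) type name starting at each position (objective: alternative algorithm).

-- the module constant tipos_pokemon
def pvTipos : List String :=
  ["Normal", "Fire", "Water", "Electric", "Grass", "Ice", "Fighting", "Poison",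
   "Ground", "Flying", "Psychic", "Bug", "Rock", "Ghost", "Dragon", "Dark",
   "Steel", "Fairy"]

-- ===== PORT A =====
-- literal port: for each tipo, if tipo in moves, extend resultado by [tipo]*moves.count(tipo);
-- the isinstance guard is vacuous here since moves : String is always a str.
def extraer_tipos_de_moves (moves : String) : String :=
  let resultado := pvTipos.foldl (fun acc tipo =>
    if PySem.Str.isIn tipo moves then
      acc ++ List.replicate (PySem.Str.count moves tipo) tipo
    else acc) ([] : List String)
  PySem.Str.join " " resultado

-- ===== PORT B =====
-- 'for i in range(len(moves)): for tipo in tipos_pokemon: if moves.startswith(tipo, i): found.append(tipo); break'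
-- ported as structural recursion over the suffixes of moves: moves.startswith(tipo, i) for
-- 0 ≤ i < len(moves) is exactly Chars.startswith on the i-th suffix, and the inner
-- first-match-then-break loop is find?.
def pvScan : List Char → List String
  | [] => []
  | c :: rest =>
    match pvTipos.find? (fun t => PySem.Chars.startswith (c :: rest) t.toList) with
    | some t => t :: pvScan rest
    | none => pvScan rest

def extraer_tipos_de_moves_alt (moves : String) : String :=
  let found := pvScan moves.toList
  let resultado := pvTipos.flatMap (fun t => List.replicate (found.count t) t)
  PySem.Str.join " " resultado

-- ===== PRECONDITION & SPEC =====
def Spec_extraer_tipos_de_moves (moves : String) (out : String) : Prop := out = extraer_tipos_de_moves_alt moves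
instance (moves : String) (out : String) : Decidable (Spec_extraer_tipos_de_moves moves out) := by unfold Spec_extraer_tipos_de_moves; infer_instance

-- ===== CLAIM (what is proved, stated in full; the proofs are below) =====
def Claim_equal_extraer_tipos_de_moves : Prop := ∀ (moves : String), Dom_extraer_tipos_de_moves moves → Spec_extraer_tipos_de_moves moves (extraer_tipos_de_moves moves)

-- ===== LEMMAS AND PROOFS =====

-- number of positions j of s at which t starts (counts all starting positions)
def pvN (t : List Char) : List Char → Nat
  | [] => 0
  | c :: rest => (if t.isPrefixOf (c :: rest) then 1 else 0) + pvN t rest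

-- t never restarts strictly inside itself (its first char differs from every later char)
def pvNoBorder (t : List Char) : Prop := ∀ i < t.length, 1 ≤ i → t[0]? ≠ t[i]?

theorem pvTipos_ne : ∀ t ∈ pvTipos, t.toList ≠ [] := by decide

theorem pvTipos_nb : ∀ t ∈ pvTipos, pvNoBorder t.toList := by
  have h : ∀ t ∈ pvTipos, ∀ i < t.toList.length, 1 ≤ i → t.toList[0]? ≠ t.toList[i]? := by decide
  exact h

-- no type name is a prefix of a different type name
theorem pvTipos_np : ∀ t ∈ pvTipos, ∀ u ∈ pvTipos, t ≠ u → ¬ t.toList <+: u.toList := by decide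

theorem pvGo_acc (t : List Char) (fuel : Nat) (l : List Char) (acc : Nat) :
    PySem.Chars.count.go t fuel l acc = acc + PySem.Chars.count.go t fuel l 0 := by
  induction fuel generalizing l acc with
  | zero => simp [PySem.Chars.count.go]
  | succ n ih =>
    cases l with
    | nil => simp [PySem.Chars.count.go]
    | cons c rest =>
      simp only [PySem.Chars.count.go]
      split_ifs with h
      · rw [ih _ (acc+1), ih _ 1]; omega
      · rw [ih _ acc]

theorem pvGo_fuel (t : List Char) (ht : t ≠ []) (n : Nat) :
    ∀ (l : List Char), l.length ≤ n → ∀ (f f' : Nat), l.length ≤ f → l.length ≤ f' →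
      PySem.Chars.count.go t f l 0 = PySem.Chars.count.go t f' l 0 := by
  induction n with
  | zero =>
    intro l hl f f' _ _
    have : l = [] := by cases l <;> simp_all
    subst this
    cases f <;> cases f' <;> simp [PySem.Chars.count.go]
  | succ n ih =>
    intro l hl f f' hf hf'
    cases l with
    | nil => cases f <;> cases f' <;> simp [PySem.Chars.count.go]
    | cons c rest =>
      have hlen : t.length ≥ 1 := by cases t <;> simp_all
      simp only [List.length_cons] at hl hf hf'
      obtain ⟨f, rfl⟩ : ∃ m, f = m + 1 := ⟨f - 1, by omega⟩
      obtain ⟨f', rfl⟩ : ∃ m, f' = m + 1 := ⟨f' - 1, by omega⟩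
      simp only [PySem.Chars.count.go]
      split_ifs with h1
      · rw [pvGo_acc t f, pvGo_acc t f']
        have hd : (List.drop t.length (c :: rest)).length ≤ rest.length := by
          simp [List.length_drop]; omega
        have hr : rest.length ≤ n := by omega
        rw [ih _ (le_trans hd hr) f f' (by omega) (by omega)]
      · have hr : rest.length ≤ n := by omega
        exact ih rest hr f f' (by omega) (by omega)

theorem pvCount_nil (t : List Char) (ht : t ≠ []) : PySem.Chars.count [] t = 0 := by
  simp [PySem.Chars.count, PySem.Chars.count.go, ht]

theorem pvCount_cons (t : List Char) (ht : t ≠ []) (c : Char) (rest : List Char) :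
    PySem.Chars.count (c :: rest) t =
      if t <+: (c :: rest) then 1 + PySem.Chars.count ((c :: rest).drop t.length) t
      else PySem.Chars.count rest t := by
  have hne : t.isEmpty = false := by cases t <;> simp_all
  simp only [PySem.Chars.count, hne, Bool.false_eq_true, if_false, List.length_cons]
  rw [show PySem.Chars.count.go t (rest.length + 1) (c :: rest) 0 =
      if t.isPrefixOf (c :: rest) then
        PySem.Chars.count.go t rest.length (List.drop t.length (c :: rest)) 1
      else PySem.Chars.count.go t rest.length rest 0 from by
    simp only [PySem.Chars.count.go]]
  have hlen : t.length ≥ 1 := by cases t <;> simp_all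
  have hd : (List.drop t.length (c :: rest)).length ≤ rest.length := by
    simp [List.length_drop]; omega
  simp only [List.isPrefixOf_iff_prefix]
  split_ifs with h1
  · rw [pvGo_acc, pvGo_fuel t ht _ _ (le_refl _) rest.length _ hd (le_refl _)]
  · rfl

theorem pvN_append_skip (t : List Char) (u v : List Char)
    (h : ∀ j < u.length, ¬ t <+: (u.drop j ++ v)) : pvN t (u ++ v) = pvN t v := by
  induction u with
  | nil => rfl
  | cons c u' ih =>
    have h0 : ¬ t <+: (c :: (u' ++ v)) := by
      have := h 0 (by simp); simpa [List.cons_append] using this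
    simp only [List.cons_append, pvN, List.isPrefixOf_iff_prefix]
    rw [if_neg h0, ih (fun j hj => by have := h (j+1) (by simp; omega); simpa using this)]
    omega

theorem pvN_match (t : List Char) (ht : t ≠ []) (hb : pvNoBorder t) (s : List Char)
    (hpre : t <+: s) : pvN t s = 1 + pvN t (s.drop t.length) := by
  obtain ⟨v, rfl⟩ := hpre
  obtain ⟨c0, t', rfl⟩ : ∃ c0 t', t = c0 :: t' := by
    cases t with | nil => exact absurd rfl ht | cons a b => exact ⟨a, b, rfl⟩
  simp only [List.cons_append, pvN, List.isPrefixOf_iff_prefix]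
  rw [if_pos (by exact ⟨v, by simp⟩)]
  have hskip : ∀ j < t'.length, ¬ (c0 :: t') <+: (t'.drop j ++ v) := by
    intro j hj hcon
    have h1 : (t'.drop j ++ v)[0]? = some c0 := by
      obtain ⟨w, hw⟩ := hcon
      rw [← hw]; simp
    have h2 : (t'.drop j ++ v)[0]? = t'[j]? := by
      rw [List.getElem?_append_left (by simp [List.length_drop]; omega)]
      simp [List.getElem?_drop]
    have := hb (j+1) (by simp; omega) (by omega)
    simp only [List.getElem?_cons_zero, List.getElem?_cons_succ] at this
    exact this (by rw [h1.symm.trans h2])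
  rw [pvN_append_skip _ _ _ hskip,
      show List.drop (c0 :: t').length (c0 :: (t' ++ v)) = v from by simp]

theorem pvN_zero (t s : List Char) (h : ∀ j, ¬ t <+: s.drop j) : pvN t s = 0 := by
  induction s with
  | nil => rfl
  | cons c rest ih =>
    simp only [pvN, List.isPrefixOf_iff_prefix]
    rw [if_neg (by have := h 0; simpa using this), ih (fun j => by have := h (j+1); simpa using this)]

theorem pvCount_eq_N (t : List Char) (ht : t ≠ []) (hb : pvNoBorder t) (s : List Char) :
    PySem.Chars.count s t = pvN t s := by
  induction hn : s.length using Nat.strong_induction_on generalizing s with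
  | _ n ih =>
  cases s with
  | nil => rw [pvCount_nil t ht]; rfl
  | cons c rest =>
    rw [pvCount_cons t ht]
    split_ifs with h1
    · rw [ih ((c :: rest).drop t.length).length (by subst hn; simp [List.length_drop]; cases t <;> simp_all) _ rfl]
      rw [← pvN_match t ht hb _ h1]
    · rw [ih rest.length (by subst hn; simp) _ rfl]
      simp only [pvN, List.isPrefixOf_iff_prefix]
      rw [if_neg h1]; omega

theorem pvScan_count (t : String) (ht : t ∈ pvTipos) (s : List Char) :
    (pvScan s).count t = pvN t.toList s := by
  induction s with
  | nil => rfl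
  | cons c rest ih =>
    simp only [pvScan]
    cases hf : pvTipos.find? (fun u => PySem.Chars.startswith (c :: rest) u.toList) with
    | none =>
      have hno : ¬ t.toList <+: (c :: rest) := by
        have := List.find?_eq_none.mp hf t ht
        simpa [PySem.Chars.startswith_iff] using this
      simp only [pvN, List.isPrefixOf_iff_prefix]
      rw [ih, if_neg hno]; omega
    | some u =>
      have hmem : u ∈ pvTipos := List.mem_of_find?_eq_some hf
      have hu : u.toList <+: (c :: rest) := by
        have := List.find?_some hf
        simpa [PySem.Chars.startswith_iff] using this
      rw [List.count_cons, ih]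
      simp only [pvN, List.isPrefixOf_iff_prefix]
      by_cases he : u = t
      · subst he
        simp only [hu, if_pos, BEq.rfl]; omega
      · have hno : ¬ t.toList <+: (c :: rest) := by
          intro hcon
          rcases List.prefix_or_prefix_of_prefix hcon hu with h | h
          · exact pvTipos_np t ht u hmem (fun e => he e.symm) h
          · exact pvTipos_np u hmem t ht he h
        rw [if_neg hno, if_neg (by simpa using he)]; omega

theorem pvFoldl_flatMap {α β : Type} (l : List α) (p : α → Bool) (f : α → List β)
    (acc : List β) :
    l.foldl (fun acc x => if p x then acc ++ f x else acc) acc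
      = acc ++ l.flatMap (fun x => if p x then f x else []) := by
  induction l generalizing acc with
  | nil => simp
  | cons x l ih =>
    simp only [List.foldl_cons, List.flatMap_cons, ih]
    split_ifs <;> simp

theorem pvLists_eq (moves : String) :
    pvTipos.foldl (fun acc tipo =>
      if PySem.Str.isIn tipo moves then
        acc ++ List.replicate (PySem.Str.count moves tipo) tipo
      else acc) ([] : List String)
    = pvTipos.flatMap (fun t => List.replicate ((pvScan moves.toList).count t) t) := by
  rw [pvFoldl_flatMap, List.nil_append]
  apply List.flatMap_congr
  intro t ht
  rw [pvScan_count t ht]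
  by_cases hin : PySem.Str.isIn t moves = true
  · rw [if_pos hin, PySem.Str.count_eq,
        pvCount_eq_N t.toList (pvTipos_ne t ht) (pvTipos_nb t ht)]
  · rw [if_neg hin]
    have hno : ∀ j, ¬ t.toList <+: moves.toList.drop j := by
      intro j hcon
      have : PySem.Chars.isIn t.toList moves.toList = true :=
        (PySem.Chars.exists_prefix_drop_iff_isIn _ _).mp ⟨j, hcon⟩
      rw [← PySem.Str.isIn_eq] at this
      exact hin this
    rw [pvN_zero _ _ hno]
    rfl

-- ===== VERDICT (by name: the statement is the Claim_ definition above) =====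
theorem extraer_tipos_de_moves_spec : Claim_equal_extraer_tipos_de_moves := by
  intro moves _
  unfold Spec_extraer_tipos_de_moves extraer_tipos_de_moves extraer_tipos_de_moves_alt
  rw [pvLists_eq]
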